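-- pv_equiv track=rewrite | github.com/Mayer-04/logica-python | ejercicios/ejercicios_2/ejercicio_16.py | cuidad_temp_alta
-- ===== SOURCE A (Python) =====
-- def cuidad_temp_alta(temperaturas: dict[str, int]) -> str:
--     ciudad = ""
--     lista_temp = []
--
--     for temp in temperaturas.values():
--         lista_temp.append(temp)
--
--     temp_mas_alta = max(lista_temp)
--
--     for city, temp in temperaturas.items():
--         if temp == temp_mas_alta:
--             ciudad = city
--
--     return ciudad
-- ===== SOURCE B (Python) =====
-- def cuidad_temp_alta(temperaturas: dict[str, int]) -> str:
--     indexed = list(enumerate(temperaturas.items()))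
--     _, (city, _) = max(indexed, key=lambda t: (t[1][1], t[0]))
--     return city
-- ===== Notes on version B (the rewrite author's own statement) =====
-- stated objective: idiomatic
-- what changed: Replaces A's two passes (build a value list, take max, then rescan for the last city with that max) by one library max over enumerate(items) keyed by (temperature, position), so the last tied city wins directly and the empty dict still raises ValueError like A.
import Mathlib
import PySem

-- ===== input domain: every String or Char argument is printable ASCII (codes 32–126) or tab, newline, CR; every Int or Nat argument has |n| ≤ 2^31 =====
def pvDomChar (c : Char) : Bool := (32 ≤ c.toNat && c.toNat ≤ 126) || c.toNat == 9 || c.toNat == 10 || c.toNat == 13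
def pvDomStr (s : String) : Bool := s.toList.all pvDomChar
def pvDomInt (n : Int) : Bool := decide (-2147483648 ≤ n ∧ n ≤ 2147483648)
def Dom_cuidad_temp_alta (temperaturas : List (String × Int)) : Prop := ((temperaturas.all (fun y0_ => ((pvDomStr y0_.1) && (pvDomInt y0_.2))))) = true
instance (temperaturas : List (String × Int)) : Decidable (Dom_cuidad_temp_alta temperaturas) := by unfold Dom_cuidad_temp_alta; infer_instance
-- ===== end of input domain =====

-- B replaces A's two passes (collect values, max, rescan for the last max city) by one
-- keyed max over enumerate(items) with tuple key (temp, index); same value on every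
-- non-empty dict, and both raise on the empty dict (excluded by Pre_).

-- ===== PORT A =====
def cuidad_temp_alta (temperaturas : List (String × Int)) : String :=
  let lista_temp := temperaturas.foldl (fun acc p => acc ++ [p.2]) []
  match PySem.List.max? lista_temp (fun x => x) with
  | none => ""   -- Python raises ValueError (max of empty sequence) here; excluded by Pre_
  | some temp_mas_alta =>
      temperaturas.foldl (fun ciudad p => if p.2 == temp_mas_alta then p.1 else ciudad) ""

-- ===== PORT B =====
def cuidad_temp_alta_alt (temperaturas : List (String × Int)) : String :=
  let indexed := PySem.List.enumerate temperaturas 0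
  match PySem.List.max2? indexed (fun t => t.2.2) (fun t => t.1) with
  | none => ""   -- Python raises ValueError (max of empty sequence) here; excluded by Pre_
  | some t => t.2.1

-- ===== PRECONDITION & SPEC =====
-- Pre_ excludes exactly the empty dict, on which both Pythons raise ValueError (max of empty sequence).
def Pre_cuidad_temp_alta (temperaturas : List (String × Int)) : Prop := temperaturas ≠ []
instance (temperaturas : List (String × Int)) : Decidable (Pre_cuidad_temp_alta temperaturas) := by unfold Pre_cuidad_temp_alta; infer_instance
def pvWitness_cuidad_temp_alta : (List (String × Int)) := [("Lima", 21), ("Quito", 14)]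

def Spec_cuidad_temp_alta (temperaturas : List (String × Int)) (out : String) : Prop := out = cuidad_temp_alta_alt temperaturas
instance (temperaturas : List (String × Int)) (out : String) : Decidable (Spec_cuidad_temp_alta temperaturas out) := by unfold Spec_cuidad_temp_alta; infer_instance

-- ===== CLAIM (what is proved, stated in full; the proofs are below) =====
def Claim_equal_cuidad_temp_alta : Prop := ∀ (temperaturas : List (String × Int)), Dom_cuidad_temp_alta temperaturas → Pre_cuidad_temp_alta temperaturas → Spec_cuidad_temp_alta temperaturas (cuidad_temp_alta temperaturas)

-- ===== LEMMAS AND PROOFS =====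

-- A's first loop just collects the values.
lemma pv_collect (l : List (String × Int)) (acc : List Int) :
    l.foldl (fun acc p => acc ++ [p.2]) acc = acc ++ l.map Prod.snd := by
  induction l generalizing acc with
  | nil => simp
  | cons h t ih => simp [List.foldl_cons, ih]

-- Core invariant: B's keyed max over the enumerated non-empty list picks some index j,
-- A's "last city with the maximal temperature", and the maximal temperature itself.
lemma pv_keyB (t : List (String × Int)) (h : String × Int) :
    ∃ j : Int, j ≤ (t.length : Int) ∧
      PySem.List.max2? (PySem.List.enumerate (h :: t) 0) (fun t => t.2.2) (fun t => t.1)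
        = some (j,
            ((h :: t).foldl
              (fun ciudad p => if p.2 == (t.map Prod.snd).foldl max h.2 then p.1 else ciudad) "",
             (t.map Prod.snd).foldl max h.2)) := by
  induction t using List.reverseRecOn with
  | nil =>
      exact ⟨0, by simp, by simp [PySem.List.max2?, PySem.List.enumerate_cons,
        PySem.List.enumerate_nil]⟩
  | append_singleton t x ih =>
      obtain ⟨j, hj, hfold⟩ := ih
      have hcons : h :: (t ++ [x]) = (h :: t) ++ [x] := by simp
      have henum : PySem.List.enumerate (h :: (t ++ [x])) 0
          = PySem.List.enumerate (h :: t) 0 ++ [((0 + (h :: t).length : Int), x)] := by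
        rw [hcons, PySem.List.enumerate_append]
        simp [PySem.List.enumerate_cons, PySem.List.enumerate_nil]
      unfold PySem.List.max2? at hfold ⊢
      rw [henum, List.foldl_append, hfold]
      by_cases hge : (t.map Prod.snd).foldl max h.2 ≤ x.2
      · -- x wins (strictly larger, or a tie broken by the larger index)
        have hM : ((t ++ [x]).map Prod.snd).foldl max h.2 = x.2 := by
          simp [List.foldl_append]; omega
        refine ⟨(0 + (h :: t).length : Int), by simp, ?_⟩
        have hc : (decide ((t.map Prod.snd).foldl max h.2 < x.2)
            || !decide (x.2 < (t.map Prod.snd).foldl max h.2)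
               && decide (j < (0 + (h :: t).length : Int))) = true := by
          simp only [Bool.or_eq_true, Bool.and_eq_true, Bool.not_eq_true',
            decide_eq_true_eq, decide_eq_false_iff_not, List.length_cons]
          push_cast; omega
        simp only [List.foldl_cons, List.foldl_nil, hc, if_true]
        simp [List.foldl_append]
        have hm : max ((t.map Prod.snd).foldl max h.2) x.2 = x.2 := by omega
        rw [if_pos hge, hm]
      · -- x loses: state unchanged, maximum unchanged
        have hM : ((t ++ [x]).map Prod.snd).foldl max h.2 = (t.map Prod.snd).foldl max h.2 := by
          simp [List.foldl_append]; omega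
        refine ⟨j, by simp only [List.length_append]; push_cast; omega, ?_⟩
        have hc : (decide ((t.map Prod.snd).foldl max h.2 < x.2)
            || !decide (x.2 < (t.map Prod.snd).foldl max h.2)
               && decide (j < (0 + (h :: t).length : Int))) = false := by
          have h1 : decide ((t.map Prod.snd).foldl max h.2 < x.2) = false := by
            simp only [decide_eq_false_iff_not]; omega
          have h2 : (!decide (x.2 < (t.map Prod.snd).foldl max h.2)) = false := by
            simp only [Bool.not_eq_false', decide_eq_true_eq]; omega
          rw [h1, h2]; simp
        have hne : ¬ x.2 = (t.map Prod.snd).foldl max h.2 := by omega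
        simp only [List.foldl_cons, List.foldl_nil, hc, if_false]
        simp [List.foldl_append]
        have hm : max ((t.map Prod.snd).foldl max h.2) x.2 = (t.map Prod.snd).foldl max h.2 := by omega
        rw [hm, if_neg hge]
        exact ⟨rfl, by omega⟩

-- ===== VERDICT (by name: the statement is the Claim_ definition above) =====
theorem cuidad_temp_alta_spec : Claim_equal_cuidad_temp_alta := by
  intro l _ hpre
  unfold Spec_cuidad_temp_alta cuidad_temp_alta cuidad_temp_alta_alt
  match l, hpre with
  | h :: t, _ =>
    obtain ⟨j, _, hfold⟩ := pv_keyB t h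
    rw [pv_collect]
    simp only [List.nil_append, List.map_cons, PySem.List.max?_id_cons, hfold]
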